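-- pv_equiv track=rewrite | github.com/Patriziox/PythonDb | Source/SqlGeneric.py | CreatePermuta
-- ===== SOURCE A (Python) =====
-- def CreatePermuta(vsSrc : list[str], sSep : str = ',') -> list[str] :
--
--     iCntSrc = len(vsSrc)
--     iTotItems = pow(2, iCntSrc)
--     iStep = iTotItems
--
--     vTargetTmp = [''] * iTotItems
--     viQntItems = [0] * iTotItems
--
--     for hh in range(iCntSrc) :
--
--         iIndex = 0
--         iStep //= 2
--
--         while iIndex < iTotItems :
--             for jj in range(iStep) :
--                 vTargetTmp[iIndex] = f'{vTargetTmp[iIndex]}{sSep}{vsSrc[hh]}' if vTargetTmp[iIndex] else vsSrc[hh]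
--                 viQntItems[iIndex] += 1
--                 iIndex += 1
--
--             iIndex += iStep
--
--     vTarget = []
--
--     for iSize in range(iCntSrc, -1, -1) :
--         for jj in range(iTotItems) :
--             if viQntItems[jj] == iSize :
--                 vTarget.append(vTargetTmp[jj])
--
--     return vTarget
-- ===== SOURCE B (Python) =====
-- def CreatePermuta(vsSrc: list[str], sSep: str = ',') -> list[str]:
--     n = len(vsSrc)
--     buckets = [[] for _ in range(n + 1)]
--     for j in range(2 ** n):
--         s = ''
--         cnt = 0
--         for hh in range(n):
--             if (j >> (n - 1 - hh)) & 1 == 0: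
--                 s = f'{s}{sSep}{vsSrc[hh]}' if s else vsSrc[hh]
--                 cnt += 1
--         buckets[cnt].append(s)
--     out = []
--     for b in reversed(buckets):
--         out.extend(b)
--     return out
-- ===== Notes on version B (the rewrite author's own statement) =====
-- stated objective: simpler
-- what changed: A fills all 2^n slots with a step-halving block-pattern of nested while/for loops over shared mutable arrays and then rescans all slots once per size; B enumerates each subset index j once, decides membership of element hh by bit (n-1-hh) of j, and buckets each built string by its item count, emitting buckets from size n down to 0.
import Mathlib
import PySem

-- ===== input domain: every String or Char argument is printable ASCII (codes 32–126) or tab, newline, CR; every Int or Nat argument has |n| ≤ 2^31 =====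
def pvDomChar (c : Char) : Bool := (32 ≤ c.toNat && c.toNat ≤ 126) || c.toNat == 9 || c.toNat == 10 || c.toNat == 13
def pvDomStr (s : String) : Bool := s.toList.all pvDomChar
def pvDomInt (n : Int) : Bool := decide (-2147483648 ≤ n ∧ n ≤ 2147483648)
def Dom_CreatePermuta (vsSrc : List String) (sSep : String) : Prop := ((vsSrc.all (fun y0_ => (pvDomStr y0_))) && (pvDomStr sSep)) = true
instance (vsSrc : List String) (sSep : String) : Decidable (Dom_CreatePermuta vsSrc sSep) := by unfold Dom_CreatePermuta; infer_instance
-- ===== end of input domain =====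

-- B replaces A's step-halving block-fill over the 2^n slots by a direct per-index bit test
-- with bucketing by item count (objective: simpler; same return value).

-- ===== PORT A =====
-- inner 'for jj in range(iStep)' of A: updates positions iIndex .. iIndex+iStep-1, returns new iIndex
def pvForFill (sep x : String) : Nat → Nat → List String → List Nat → (List String × List Nat × Nat)
  | 0, idx, tmp, qnt => (tmp, qnt, idx)
  | jj+1, idx, tmp, qnt =>
      let cur := tmp.getD idx ""
      let tmp' := tmp.set idx (if cur = "" then x else cur ++ sep ++ x)
      let qnt' := qnt.set idx (qnt.getD idx 0 + 1)
      pvForFill sep x jj (idx+1) tmp' qnt'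

-- A's 'while iIndex < iTotItems' loop (fuel is only a totality guard; A's calls never exhaust it)
def pvWhileFill (sep x : String) (tot step : Nat) : Nat → Nat → List String → List Nat → (List String × List Nat)
  | 0, _, tmp, qnt => (tmp, qnt)
  | fuel+1, idx, tmp, qnt =>
      if idx < tot then
        let r := pvForFill sep x step idx tmp qnt
        pvWhileFill sep x tot step fuel (r.2.2 + step) r.1 r.2.1
      else (tmp, qnt)

def CreatePermuta (vsSrc : List String) (sSep : String) : List String :=
  let iCntSrc := vsSrc.length
  let iTotItems := 2 ^ iCntSrc
  let st := (List.range iCntSrc).foldl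
    (fun (st : Nat × List String × List Nat) hh =>
      let iStep := st.1 / 2
      let r := pvWhileFill sSep (vsSrc.getD hh "") iTotItems iStep (iTotItems + 1) 0 st.2.1 st.2.2
      (iStep, r.1, r.2))
    (iTotItems, List.replicate iTotItems "", List.replicate iTotItems 0)
  ((List.range (iCntSrc + 1)).reverse).foldl
    (fun acc iSize =>
      (List.range iTotItems).foldl
        (fun acc2 jj => if st.2.2.getD jj 0 = iSize then acc2 ++ [st.2.1.getD jj ""] else acc2) acc)
    []

-- ===== PORT B =====
def CreatePermuta_alt (vsSrc : List String) (sSep : String) : List String :=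
  let n := vsSrc.length
  let buckets := (List.range (2 ^ n)).foldl
    (fun (bks : List (List String)) j =>
      let p := (List.range n).foldl
        (fun (p : String × Nat) hh =>
          if (j >>> (n - 1 - hh)) % 2 = 0 then
            (if p.1 = "" then vsSrc.getD hh "" else p.1 ++ sSep ++ vsSrc.getD hh "", p.2 + 1)
          else p) ("", 0)
      bks.set p.2 (bks.getD p.2 [] ++ [p.1]))
    (List.replicate (n + 1) [])
  buckets.reverse.foldl (fun acc b => acc ++ b) []

-- ===== PRECONDITION & SPEC =====
def Spec_CreatePermuta (vsSrc : List String) (sSep : String) (out : List String) : Prop := out = CreatePermuta_alt vsSrc sSep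
instance (vsSrc : List String) (sSep : String) (out : List String) : Decidable (Spec_CreatePermuta vsSrc sSep out) := by unfold Spec_CreatePermuta; infer_instance

-- ===== CLAIM (what is proved, stated in full; the proofs are below) =====
def Claim_equal_CreatePermuta : Prop := ∀ (vsSrc : List String) (sSep : String), Dom_CreatePermuta vsSrc sSep → Spec_CreatePermuta vsSrc sSep (CreatePermuta vsSrc sSep)

-- ===== LEMMAS AND PROOFS =====


theorem pv_getD_set {α : Type} (l : List α) (i j : Nat) (v d : α) (hi : i < l.length) :
    (l.set i v).getD j d = if j = i then v else l.getD j d := by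
  rcases eq_or_ne j i with rfl | h
  · simp [List.getD_eq_getElem?_getD, hi]
  · simp [List.getD_eq_getElem?_getD, List.getElem?_set_ne (Ne.symm h), h]

theorem pv_getD_map_range {α : Type} (n t : Nat) (f : Nat → α) (d : α) (h : t < n) :
    ((List.range n).map f).getD t d = f t := by
  rw [List.getD_eq_getElem _ _ (by simpa using h)]
  simp

-- string accumulator step shared by the analysis
def pvUpd (sep x s : String) : String := if s = "" then x else s ++ sep ++ x

-- per-index model: B's inner fold over the first m of n source positions
def pvModel (src : List String) (sep : String) (n m j : Nat) : String × Nat :=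
  (List.range m).foldl
    (fun (p : String × Nat) hh =>
      if (j >>> (n - 1 - hh)) % 2 = 0 then (pvUpd sep (src.getD hh "") p.1, p.2 + 1) else p)
    ("", 0)

theorem pvModel_cnt_le (src : List String) (sep : String) (n m j : Nat) :
    (pvModel src sep n m j).2 ≤ m := by
  induction m with
  | zero => simp [pvModel]
  | succ m ih =>
    unfold pvModel at *
    rw [List.range_succ, List.foldl_append]
    simp only [List.foldl_cons, List.foldl_nil]
    split
    · exact Nat.succ_le_succ ih
    · exact le_trans ih (Nat.le_succ m)

theorem pvForFill_spec (sep x : String) (s : Nat) :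
    ∀ idx tmp qnt, idx + s ≤ tmp.length → idx + s ≤ qnt.length →
    (pvForFill sep x s idx tmp qnt).2.2 = idx + s ∧
    (pvForFill sep x s idx tmp qnt).1.length = tmp.length ∧
    (pvForFill sep x s idx tmp qnt).2.1.length = qnt.length ∧
    (∀ j, (pvForFill sep x s idx tmp qnt).1.getD j "" =
        (if idx ≤ j ∧ j < idx + s then pvUpd sep x (tmp.getD j "") else tmp.getD j "")) ∧
    (∀ j, (pvForFill sep x s idx tmp qnt).2.1.getD j 0 =
        (if idx ≤ j ∧ j < idx + s then qnt.getD j 0 + 1 else qnt.getD j 0)) := by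
  induction s with
  | zero =>
    intro idx tmp qnt h1 h2
    exact ⟨rfl, rfl, rfl, fun j => (if_neg (by omega)).symm, fun j => (if_neg (by omega)).symm⟩
  | succ s ih =>
    intro idx tmp qnt h1 h2
    simp only [pvForFill]
    have hlt : idx < tmp.length := by omega
    have hlt2 : idx < qnt.length := by omega
    obtain ⟨e1, e2, e3, e4, e5⟩ := ih (idx + 1)
      (tmp.set idx (if tmp.getD idx "" = "" then x else tmp.getD idx "" ++ sep ++ x))
      (qnt.set idx (qnt.getD idx 0 + 1)) (by simpa using (by omega : idx + 1 + s ≤ tmp.length))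
      (by simpa using (by omega : idx + 1 + s ≤ qnt.length))
    refine ⟨?_, ?_, ?_, fun j => ?_, fun j => ?_⟩
    · rw [e1]; omega
    · rw [e2]; simp
    · rw [e3]; simp
    · rw [e4 j, pv_getD_set tmp idx j _ _ hlt]
      by_cases hji : j = idx
      · subst hji
        rw [if_neg (show ¬(j + 1 ≤ j ∧ j < j + 1 + s) by omega)]
        rw [if_pos rfl]
        rw [if_pos (show j ≤ j ∧ j < j + (s + 1) by omega)]
        rfl
      · rw [if_neg hji]
        by_cases hr : idx + 1 ≤ j ∧ j < idx + 1 + s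
        · rw [if_pos hr, if_pos (show idx ≤ j ∧ j < idx + (s + 1) by omega)]
        · rw [if_neg hr, if_neg (show ¬(idx ≤ j ∧ j < idx + (s + 1)) by omega)]
    · rw [e5 j, pv_getD_set qnt idx j _ _ hlt2]
      by_cases hji : j = idx
      · subst hji
        rw [if_neg (show ¬(j + 1 ≤ j ∧ j < j + 1 + s) by omega)]
        rw [if_pos rfl]
        rw [if_pos (show j ≤ j ∧ j < j + (s + 1) by omega)]
      · rw [if_neg hji]
        by_cases hr : idx + 1 ≤ j ∧ j < idx + 1 + s
        · rw [if_pos hr, if_pos (show idx ≤ j ∧ j < idx + (s + 1) by omega)]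
        · rw [if_neg hr, if_neg (show ¬(idx ≤ j ∧ j < idx + (s + 1)) by omega)]

-- one while-pass of A combined with the previous array value, expressed per index
theorem pvStep_combine {α : Type} (u : α → α) (idx step q j : Nat) (hs : 0 < step)
    (hq : idx = 2 * step * q) (old : α) :
    (if idx + step + step ≤ j ∧ (j / step) % 2 = 0
       then u (if idx ≤ j ∧ j < idx + step then u old else old)
       else if idx ≤ j ∧ j < idx + step then u old else old)
    = if idx ≤ j ∧ (j / step) % 2 = 0 then u old else old := by
  have e1 : step * (2 * q) = idx := by rw [hq]; ring
  have e2 : step * (2 * q + 1) = idx + step := by rw [hq]; ring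
  rcases Nat.lt_or_ge j idx with h1 | h1
  · have n1 : ¬(idx + step + step ≤ j ∧ (j / step) % 2 = 0) := fun hc => absurd hc.1 (by omega)
    have n2 : ¬(idx ≤ j ∧ j < idx + step) := by omega
    have n3 : ¬(idx ≤ j ∧ (j / step) % 2 = 0) := fun hc => absurd hc.1 (by omega)
    rw [if_neg n1, if_neg n2, if_neg n3]
  rcases Nat.lt_or_ge j (idx + step) with h2 | h2
  · have hv : j / step = 2 * q := by
      have hj : j = step * (2 * q) + (j - idx) := by omega
      rw [hj, Nat.mul_add_div hs, Nat.div_eq_of_lt (by omega), Nat.add_zero]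
    have hp : (j / step) % 2 = 0 := by rw [hv]; omega
    have n1 : ¬(idx + step + step ≤ j ∧ (j / step) % 2 = 0) := fun hc => absurd hc.1 (by omega)
    rw [if_neg n1, if_pos ⟨h1, h2⟩, if_pos ⟨h1, hp⟩]
  rcases Nat.lt_or_ge j (idx + step + step) with h3 | h3
  · have hv : j / step = 2 * q + 1 := by
      have hj : j = step * (2 * q + 1) + (j - idx - step) := by omega
      rw [hj, Nat.mul_add_div hs, Nat.div_eq_of_lt (by omega), Nat.add_zero]
    have hp : (j / step) % 2 = 1 := by rw [hv]; omega
    have n1 : ¬(idx + step + step ≤ j ∧ (j / step) % 2 = 0) := fun hc => absurd hc.1 (by omega)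
    have n3 : ¬(idx ≤ j ∧ (j / step) % 2 = 0) := fun hc => absurd hc.2 (by omega)
    rw [if_neg n1, if_neg (show ¬(idx ≤ j ∧ j < idx + step) by omega), if_neg n3]
  · rw [if_neg (show ¬(idx ≤ j ∧ j < idx + step) by omega)]
    by_cases hp : (j / step) % 2 = 0
    · rw [if_pos ⟨by omega, hp⟩, if_pos ⟨by omega, hp⟩]
    · have n1 : ¬(idx + step + step ≤ j ∧ (j / step) % 2 = 0) := fun hc => hp hc.2
      have n3 : ¬(idx ≤ j ∧ (j / step) % 2 = 0) := fun hc => hp hc.2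
      rw [if_neg n1, if_neg n3]

theorem pvWhileFill_spec (sep x : String) (tot step : Nat) (hs : 0 < step) (hst : 2 * step ∣ tot) :
    ∀ fuel idx tmp qnt, tmp.length = tot → qnt.length = tot →
    2 * step ∣ idx → tot ≤ idx + 2 * step * fuel →
    (∀ j, j < tot → (pvWhileFill sep x tot step fuel idx tmp qnt).1.getD j "" =
        (if idx ≤ j ∧ (j / step) % 2 = 0 then pvUpd sep x (tmp.getD j "") else tmp.getD j "")) ∧
    (∀ j, j < tot → (pvWhileFill sep x tot step fuel idx tmp qnt).2.getD j 0 =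
        (if idx ≤ j ∧ (j / step) % 2 = 0 then qnt.getD j 0 + 1 else qnt.getD j 0)) ∧
    (pvWhileFill sep x tot step fuel idx tmp qnt).1.length = tot ∧
    (pvWhileFill sep x tot step fuel idx tmp qnt).2.length = tot := by
  intro fuel
  induction fuel with
  | zero =>
    intro idx tmp qnt hl1 hl2 hdvd hfuel
    simp only [pvWhileFill]
    exact ⟨fun j hj => (if_neg (fun hc => absurd hc.1 (by omega))).symm,
           fun j hj => (if_neg (fun hc => absurd hc.1 (by omega))).symm, hl1, hl2⟩
  | succ fuel ih =>
    intro idx tmp qnt hl1 hl2 hdvd hfuel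
    simp only [pvWhileFill]
    by_cases hidx : idx < tot
    · rw [if_pos hidx]
      obtain ⟨q, hq⟩ := hdvd
      obtain ⟨Q, hQ⟩ := hst
      have hqQ : q < Q := by
        have h := hidx
        rw [hq, hQ] at h
        exact lt_of_mul_lt_mul_left h (Nat.zero_le _)
      have hle2 : idx + 2 * step ≤ tot := by
        rw [hq, hQ]
        calc 2 * step * q + 2 * step = 2 * step * (q + 1) := by ring
          _ ≤ 2 * step * Q := Nat.mul_le_mul_left _ hqQ
      obtain ⟨f1, f2, f3, f4, f5⟩ := pvForFill_spec sep x step idx tmp qnt (by omega) (by omega)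
      rw [f1]
      obtain ⟨w1, w2, w3, w4⟩ := ih (idx + step + step) _ _ (by rw [f2, hl1]) (by rw [f3, hl2])
        ⟨q + 1, by rw [hq]; ring⟩ (le_trans hfuel (le_of_eq (by ring)))
      refine ⟨fun j hj => ?_, fun j hj => ?_, w3, w4⟩
      · rw [w1 j hj]
        rw [f4 j]
        exact pvStep_combine (pvUpd sep x) idx step q j hs hq (tmp.getD j "")
      · rw [w2 j hj]
        rw [f5 j]
        exact pvStep_combine (fun a => a + 1) idx step q j hs hq (qnt.getD j 0)
    · rw [if_neg hidx]
      exact ⟨fun j hj => (if_neg (fun hc => absurd hc.1 (by omega))).symm,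
             fun j hj => (if_neg (fun hc => absurd hc.1 (by omega))).symm, hl1, hl2⟩

-- fill-phase invariant for A's outer fold over hh
theorem pvFill_inv (src : List String) (sep : String) (n : Nat) (m : Nat) (hm : m ≤ n) :
    (List.range m).foldl
      (fun (st : Nat × List String × List Nat) hh =>
        let iStep := st.1 / 2
        let r := pvWhileFill sep (src.getD hh "") (2 ^ n) iStep (2 ^ n + 1) 0 st.2.1 st.2.2
        (iStep, r.1, r.2))
      (2 ^ n, List.replicate (2 ^ n) "", List.replicate (2 ^ n) 0)
    = (2 ^ (n - m),
       (List.range (2 ^ n)).map (fun j => (pvModel src sep n m j).1),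
       (List.range (2 ^ n)).map (fun j => (pvModel src sep n m j).2)) := by
  induction m with
  | zero =>
    simp only [List.range_zero, List.foldl_nil, Nat.sub_zero, Prod.mk.injEq]
    refine ⟨trivial, ?_, ?_⟩ <;> simp [pvModel]
  | succ m ih =>
    have hmn : m < n := hm
    rw [List.range_succ, List.foldl_append, ih (by omega)]
    simp only [List.foldl_cons, List.foldl_nil]
    have hstep : 2 ^ (n - m) / 2 = 2 ^ (n - (m + 1)) := by
      rw [show n - m = (n - (m + 1)) + 1 by omega, pow_succ]
      exact Nat.mul_div_cancel _ (by norm_num)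
    have hs : 0 < 2 ^ (n - (m + 1)) := Nat.two_pow_pos _
    have hdvd : 2 * 2 ^ (n - (m + 1)) ∣ 2 ^ n := by
      rw [show 2 * 2 ^ (n - (m + 1)) = 2 ^ (n - m) by
        rw [show n - m = (n - (m + 1)) + 1 by omega, pow_succ]; ring]
      exact pow_dvd_pow 2 (by omega)
    have hfuel : 2 ^ n ≤ 0 + 2 * 2 ^ (n - (m + 1)) * (2 ^ n + 1) := by
      have h1 : 2 * 1 * (2 ^ n + 1) ≤ 2 * 2 ^ (n - (m + 1)) * (2 ^ n + 1) :=
        Nat.mul_le_mul_right _ (by omega)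
      omega
    obtain ⟨w1, w2, w3, w4⟩ := pvWhileFill_spec sep (src.getD m "") (2 ^ n) (2 ^ (n - (m + 1)))
      hs hdvd (2 ^ n + 1) 0 ((List.range (2 ^ n)).map (fun j => (pvModel src sep n m j).1))
      ((List.range (2 ^ n)).map (fun j => (pvModel src sep n m j).2))
      (by simp) (by simp) ⟨0, by ring⟩ hfuel
    have hmod : ∀ j, pvModel src sep n (m + 1) j =
        (if (j >>> (n - 1 - m)) % 2 = 0
          then (pvUpd sep (src.getD m "") (pvModel src sep n m j).1, (pvModel src sep n m j).2 + 1)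
          else pvModel src sep n m j) := by
      intro j
      unfold pvModel
      rw [List.range_succ, List.foldl_append]
      simp
    have hsh : ∀ j : Nat, (j >>> (n - 1 - m)) % 2 = (j / 2 ^ (n - (m + 1))) % 2 := by
      intro j
      rw [Nat.shiftRight_eq_div_pow, show n - 1 - m = n - (m + 1) by omega]
    rw [hstep]
    simp only [Prod.mk.injEq]
    refine ⟨trivial, ?_, ?_⟩
    · refine List.ext_getElem (by rw [w3]; simp) ?_
      intro i hi1 hi2
      have hi : i < 2 ^ n := by rw [w3] at hi1; exact hi1
      rw [← List.getD_eq_getElem _ "" hi1, ← List.getD_eq_getElem _ "" hi2, w1 i hi,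
        pv_getD_map_range _ _ _ _ hi, pv_getD_map_range _ _ _ _ hi, hmod i, hsh i]
      by_cases hp : (i / 2 ^ (n - (m + 1))) % 2 = 0
      · rw [if_pos ⟨Nat.zero_le _, hp⟩, if_pos hp]
      · rw [if_neg (fun hc => hp hc.2), if_neg hp]
    · refine List.ext_getElem (by rw [w4]; simp) ?_
      intro i hi1 hi2
      have hi : i < 2 ^ n := by rw [w4] at hi1; exact hi1
      rw [← List.getD_eq_getElem _ 0 hi1, ← List.getD_eq_getElem _ 0 hi2, w2 i hi,
        pv_getD_map_range _ _ _ _ hi, pv_getD_map_range _ _ _ _ hi, hmod i, hsh i]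
      by_cases hp : (i / 2 ^ (n - (m + 1))) % 2 = 0
      · rw [if_pos ⟨Nat.zero_le _, hp⟩, if_pos hp]
      · rw [if_neg (fun hc => hp hc.2), if_neg hp]

def pvBucket (src : List String) (sep : String) (n k : Nat) : List String :=
  ((List.range (2 ^ n)).filter (fun j => (pvModel src sep n n j).2 = k)).map
    (fun j => (pvModel src sep n n j).1)

-- A's collection phase, once the arrays are known pointwise
theorem pvA_eq (src : List String) (sep : String) :
    CreatePermuta src sep =
      ((List.range (src.length + 1)).reverse).flatMap (pvBucket src sep src.length) := by
  simp only [CreatePermuta]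
  rw [pvFill_inv src sep src.length src.length le_rfl]
  dsimp only
  have hin : ∀ (acc : List String) (iSize : Nat),
      (List.range (2 ^ src.length)).foldl
        (fun acc2 jj =>
          if ((List.range (2 ^ src.length)).map (fun j => (pvModel src sep src.length src.length j).2)).getD jj 0 = iSize
          then acc2 ++ [((List.range (2 ^ src.length)).map (fun j => (pvModel src sep src.length src.length j).1)).getD jj ""]
          else acc2) acc
      = acc ++ pvBucket src sep src.length iSize := by
    intro acc iSize
    calc (List.range (2 ^ src.length)).foldl _ acc
        = (List.range (2 ^ src.length)).foldl
            (fun acc2 jj =>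
              if (pvModel src sep src.length src.length jj).2 = iSize
              then acc2 ++ [(pvModel src sep src.length src.length jj).1] else acc2) acc :=
          PySem.List.foldl_congr_mem _ _ _ _ (fun acc2 jj hmem => by
            rw [pv_getD_map_range _ _ _ _ (List.mem_range.1 hmem),
                pv_getD_map_range _ _ _ _ (List.mem_range.1 hmem)])
      _ = acc ++ pvBucket src sep src.length iSize := by
          rw [PySem.List.foldl_append_ite]
          rfl
  calc ((List.range (src.length + 1)).reverse).foldl _ []
      = ((List.range (src.length + 1)).reverse).foldl
          (fun acc iSize => acc ++ pvBucket src sep src.length iSize) [] :=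
        PySem.List.foldl_congr_mem _ _ _ _ (fun acc iSize _ => hin acc iSize)
    _ = _ := by rw [PySem.List.foldl_append_eq_flatMap, List.nil_append]

-- B's bucket fold, characterised
theorem pvBuckets_eq (src : List String) (sep : String) (t : Nat) :
    (List.range t).foldl
      (fun (bks : List (List String)) j =>
        bks.set (pvModel src sep src.length src.length j).2
          (bks.getD (pvModel src sep src.length src.length j).2 [] ++ [(pvModel src sep src.length src.length j).1]))
      (List.replicate (src.length + 1) [])
    = (List.range (src.length + 1)).map
        (fun k => ((List.range t).filter (fun j => (pvModel src sep src.length src.length j).2 = k)).map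
            (fun j => (pvModel src sep src.length src.length j).1)) := by
  induction t with
  | zero => simp
  | succ t ih =>
    rw [List.range_succ, List.foldl_append, ih]
    simp only [List.foldl_cons, List.foldl_nil]
    have hc : (pvModel src sep src.length src.length t).2 < src.length + 1 :=
      Nat.lt_succ_of_le (pvModel_cnt_le src sep src.length src.length t)
    rw [pv_getD_map_range _ _ _ _ hc]
    refine List.ext_getElem (by simp) ?_
    intro k hk1 hk2
    have hk : k < src.length + 1 := by simpa using hk2
    rw [List.getElem_set, List.getElem_map, List.getElem_map, List.getElem_range]
    rw [List.filter_append, List.map_append]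
    by_cases hck : (pvModel src sep src.length src.length t).2 = k
    · rw [if_pos hck, hck]
      simp [hck]
    · rw [if_neg hck]
      simp [hck]

theorem pvB_eq (src : List String) (sep : String) :
    CreatePermuta_alt src sep =
      ((List.range (src.length + 1)).reverse).flatMap (pvBucket src sep src.length) := by
  have h0 : CreatePermuta_alt src sep =
      (((List.range (2 ^ src.length)).foldl
        (fun (bks : List (List String)) j =>
          bks.set (pvModel src sep src.length src.length j).2
            (bks.getD (pvModel src sep src.length src.length j).2 [] ++ [(pvModel src sep src.length src.length j).1]))
        (List.replicate (src.length + 1) [])).reverse).foldl (fun acc b => acc ++ b) [] := rfl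
  rw [h0, pvBuckets_eq src sep (2 ^ src.length)]
  rw [← List.map_reverse, PySem.List.foldl_append_eq_flatten, List.nil_append]
  rfl


-- ===== VERDICT (by name: the statement is the Claim_ definition above) =====
theorem CreatePermuta_spec : Claim_equal_CreatePermuta := by
  intro vsSrc sSep _h
  unfold Spec_CreatePermuta
  rw [pvA_eq, pvB_eq]
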